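-- pv_equiv track=rewrite | github.com/shanle1117/workshop2 | src/prompt_builder.py | _format_faq_context
-- ===== SOURCE A (Python) =====
-- from typing import List, Dict, Any, Optional
--
-- def _format_faq_context(faq_docs: List[Dict[str, Any]]) -> str:
--     lines: List[str] = []
--     for i, doc in enumerate(faq_docs, start=1):
--         q = doc.get("question", "")
--         a = doc.get("answer", "")
--         if not q and not a:
--             continue
--         lines.append(f"FAQ {i}:")
--         if q:
--             lines.append(f"Q: {q}")
--         if a:
--             lines.append(f"A: {a}")
--         lines.append("")
--     return "\n".join(lines).strip()
-- ===== SOURCE B (Python) =====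
-- from typing import List, Dict, Any
--
--
-- def _format_faq_context(faq_docs: List[Dict[str, Any]]) -> str:
--     # Recursive, back-to-front: build the text for the tail first, then decide
--     # whether and how to prepend the current doc's block; no line list, no
--     # sentinel empty lines.  Final strip tidies whitespace-only questions/answers.
--     def go(i: int, docs: List[Dict[str, Any]]) -> str:
--         if not docs:
--             return ""
--         rest = go(i + 1, docs[1:])
--         q = docs[0].get("question", "")
--         a = docs[0].get("answer", "")
--         if not q and not a:
--             return rest
--         block = f"FAQ {i}:"
--         if q:
--             block += f"\nQ: {q}"
--         if a:
--             block += f"\nA: {a}"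
--         return block if not rest else block + "\n\n" + rest
--
--     return go(1, faq_docs).strip()
-- ===== Notes on version B (the rewrite author's own statement) =====
-- stated objective: alternative
-- what changed: B is a back-to-front recursion that builds each block by string concatenation and decides the separator from whether the already-built tail text is empty, instead of A's iterative flat line list with empty-string sentinel lines joined by '\n' and stripped.
import Mathlib
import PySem

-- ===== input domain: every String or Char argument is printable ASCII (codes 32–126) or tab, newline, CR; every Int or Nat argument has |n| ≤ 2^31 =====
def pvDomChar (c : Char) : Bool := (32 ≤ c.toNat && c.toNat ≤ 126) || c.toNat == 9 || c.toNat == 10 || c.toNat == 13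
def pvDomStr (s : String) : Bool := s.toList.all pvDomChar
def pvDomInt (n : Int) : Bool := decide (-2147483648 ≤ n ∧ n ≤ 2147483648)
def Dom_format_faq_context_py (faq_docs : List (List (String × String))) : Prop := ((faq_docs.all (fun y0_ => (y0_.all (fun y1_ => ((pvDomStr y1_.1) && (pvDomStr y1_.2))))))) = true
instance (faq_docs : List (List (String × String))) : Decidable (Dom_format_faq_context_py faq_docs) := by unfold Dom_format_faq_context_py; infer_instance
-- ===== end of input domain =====

-- B replaces A's iterative flat line list (with "" sentinel lines, joined by "\n", then
-- stripped) by a back-to-front recursion that builds each block by string concatenation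
-- and chooses the separator from whether the already-built tail text is empty.

-- ===== PORT A =====
def format_faq_context_py (faq_docs : List (List (String × String))) : String :=
  let lines : List String :=
    (PySem.List.enumerate faq_docs 1).foldl
      (fun lines p =>
        let q := (PySem.Dict.mk p.2).getD "question" ""
        let a := (PySem.Dict.mk p.2).getD "answer" ""
        if q = "" ∧ a = "" then lines
        else
          let lines := lines ++ ["FAQ " ++ PySem.Int.toStr p.1 ++ ":"]
          let lines := if q ≠ "" then lines ++ ["Q: " ++ q] else lines
          let lines := if a ≠ "" then lines ++ ["A: " ++ a] else lines
          lines ++ [""])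
      []
  PySem.Str.strip (PySem.Str.join "\n" lines)

-- ===== PORT B =====
def faqGo (i : Int) : List (List (String × String)) → String
  | [] => ""
  | d :: rest =>
    let r := faqGo (i + 1) rest
    let q := (PySem.Dict.mk d).getD "question" ""
    let a := (PySem.Dict.mk d).getD "answer" ""
    if q = "" ∧ a = "" then r
    else
      let block := "FAQ " ++ PySem.Int.toStr i ++ ":"
      let block := if q ≠ "" then block ++ "\nQ: " ++ q else block
      let block := if a ≠ "" then block ++ "\nA: " ++ a else block
      if r = "" then block else block ++ "\n\n" ++ r

def format_faq_context_py_alt (faq_docs : List (List (String × String))) : String :=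
  PySem.Str.strip (faqGo 1 faq_docs)

-- ===== PRECONDITION & SPEC =====
def Spec_format_faq_context_py (faq_docs : List (List (String × String))) (out : String) : Prop := out = format_faq_context_py_alt faq_docs
instance (faq_docs : List (List (String × String))) (out : String) : Decidable (Spec_format_faq_context_py faq_docs out) := by unfold Spec_format_faq_context_py; infer_instance

-- ===== CLAIM (what is proved, stated in full; the proofs are below) =====
def Claim_equal_format_faq_context_py : Prop := ∀ (faq_docs : List (List (String × String))), Dom_format_faq_context_py faq_docs → Spec_format_faq_context_py faq_docs (format_faq_context_py faq_docs)

-- ===== LEMMAS AND PROOFS =====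

-- the (string-level) block lines of one doc
def faqBlockLines? (p : Int × List (String × String)) : Option (List String) :=
  let q := (PySem.Dict.mk p.2).getD "question" ""
  let a := (PySem.Dict.mk p.2).getD "answer" ""
  if q = "" ∧ a = "" then none
  else some (["FAQ " ++ PySem.Int.toStr p.1 ++ ":"]
      ++ (if q ≠ "" then ["Q: " ++ q] else [])
      ++ (if a ≠ "" then ["A: " ++ a] else []))

theorem foldA_eq (l : List (Int × List (String × String))) (acc : List String) :
    l.foldl
      (fun lines p =>
        let q := (PySem.Dict.mk p.2).getD "question" ""
        let a := (PySem.Dict.mk p.2).getD "answer" ""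
        if q = "" ∧ a = "" then lines
        else
          let lines := lines ++ ["FAQ " ++ PySem.Int.toStr p.1 ++ ":"]
          let lines := if q ≠ "" then lines ++ ["Q: " ++ q] else lines
          let lines := if a ≠ "" then lines ++ ["A: " ++ a] else lines
          lines ++ [""])
      acc
    = acc ++ l.flatMap (fun p => match faqBlockLines? p with
        | none => []
        | some bl => bl ++ [""]) := by
  induction l generalizing acc with
  | nil => simp
  | cons p rest ih =>
    simp only [List.foldl_cons, List.flatMap_cons, ih]
    unfold faqBlockLines?
    by_cases hq : (PySem.Dict.mk p.2).getD "question" "" = "" <;>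
      by_cases ha : (PySem.Dict.mk p.2).getD "answer" "" = "" <;>
        simp [hq, ha]

-- join sep (x :: L) for nonempty L
theorem join_cons_ne (sep x : List Char) (L : List (List Char)) (h : L ≠ []) :
    PySem.Chars.join sep (x :: L) = x ++ sep ++ PySem.Chars.join sep L := by
  cases L with
  | nil => exact absurd rfl h
  | cons y r => exact PySem.Chars.join_cons_cons sep x y r

theorem join_append_ne (sep : List Char) (xs ys : List (List Char)) (hxs : xs ≠ [])
    (hys : ys ≠ []) :
    PySem.Chars.join sep (xs ++ ys) =
      PySem.Chars.join sep xs ++ sep ++ PySem.Chars.join sep ys := by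
  induction xs with
  | nil => exact absurd rfl hxs
  | cons x xs ih =>
    cases xs with
    | nil =>
      simp only [List.singleton_append, PySem.Chars.join_singleton]
      rw [join_cons_ne sep x ys hys]
    | cons x2 xs2 =>
      rw [List.cons_append, join_cons_ne sep x _ (by simp),
        join_cons_ne sep x (x2 :: xs2) (by simp), ih (by simp)]
      simp [List.append_assoc]

-- join over flat lines with a trailing "" per block = join of per-block joins with doubled sep, plus one sep
theorem joinBlocks (sep : List Char) (bs : List (List (List Char)))
    (hne : ∀ B ∈ bs, B ≠ []) :
    PySem.Chars.join sep (bs.flatMap (fun B => B ++ [([] : List Char)])) =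
    PySem.Chars.join (sep ++ sep) (bs.map (PySem.Chars.join sep)) ++
      (if bs = [] then [] else sep) := by
  induction bs with
  | nil => simp [PySem.Chars.join, List.intercalate]
  | cons B rest ih =>
    have hB : B ≠ [] := hne B (by simp)
    have ih' := ih (fun B' h => hne B' (by simp [h]))
    have hsingle : PySem.Chars.join sep (B ++ [([] : List Char)]) =
        PySem.Chars.join sep B ++ sep := by
      rw [join_append_ne sep B [[]] hB (by simp), PySem.Chars.join_singleton]
      simp
    cases rest with
    | nil =>
      simp only [List.flatMap_cons, List.flatMap_nil, List.append_nil, List.map_cons,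
        List.map_nil, PySem.Chars.join_singleton]
      exact hsingle
    | cons B2 rest2 =>
      have hflat : (B2 :: rest2).flatMap (fun B => B ++ [([] : List Char)]) ≠ [] := by
        simp only [List.flatMap_cons]
        intro h
        have := congrArg List.length h
        simp at this
      rw [List.flatMap_cons,
        join_append_ne sep (B ++ [[]]) _ (by simp [hB]) hflat, hsingle, ih']
      simp only [List.map_cons]
      rw [join_cons_ne (sep ++ sep) (PySem.Chars.join sep B)
        (PySem.Chars.join sep B2 :: List.map (PySem.Chars.join sep) rest2) (by simp)]
      simp [List.append_assoc]

theorem strip_append_newline (x : List Char) :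
    PySem.Chars.strip (x ++ ['\n']) = PySem.Chars.strip x := by
  unfold PySem.Chars.strip PySem.Chars.lstrip PySem.Chars.rstrip
  rw [List.dropWhile_append]
  have hnl : PySem.Chars.isspace '\n' = true := rfl
  by_cases h : (List.dropWhile PySem.Chars.isspace x).isEmpty = true
  · have h' : List.dropWhile PySem.Chars.isspace x = [] := List.isEmpty_iff.mp h
    simp [h', hnl]
  · simp [h, hnl]

theorem flatMap_filterMap_bl (l : List (Int × List (String × String))) :
    l.flatMap (fun p => match faqBlockLines? p with
        | none => []
        | some bl => bl ++ [""])
      = (l.filterMap faqBlockLines?).flatMap (fun bl => bl ++ [""]) := by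
  induction l with
  | nil => simp
  | cons p rest ih =>
    cases h : faqBlockLines? p <;> simp [h, ih]

-- the string-level core: flat lines with "" sentinels joined by "\n" vs blocks joined by "\n\n"
theorem main_str (blocks : List (List String)) (hne : ∀ bl ∈ blocks, bl ≠ []) :
    PySem.Str.strip (PySem.Str.join "\n" (blocks.flatMap (fun bl => bl ++ [""]))) =
    PySem.Str.strip (PySem.Str.join "\n\n" (blocks.map (PySem.Str.join "\n"))) := by
  rw [← String.toList_inj]
  simp only [PySem.Str.toList_strip, PySem.Str.toList_join, List.map_flatMap, List.map_map]
  have e1 : (fun bl => (bl ++ [""]).map String.toList)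
      = fun bl : List String => bl.map String.toList ++ [([] : List Char)] := by
    funext bl; simp
  rw [e1]
  have e2 : blocks.flatMap (fun bl => bl.map String.toList ++ [([] : List Char)])
      = (blocks.map (List.map String.toList)).flatMap (fun B => B ++ [([] : List Char)]) := by
    rw [List.flatMap_map]
  have e3 : blocks.map (String.toList ∘ PySem.Str.join "\n")
      = (blocks.map (List.map String.toList)).map (PySem.Chars.join "\n".toList) := by
    simp [List.map_map, Function.comp_def]
  rw [e2, e3]
  have hne' : ∀ B ∈ blocks.map (List.map String.toList), B ≠ [] := by
    intro B hB
    rcases List.mem_map.mp hB with ⟨bl, hbl, rfl⟩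
    simpa using hne bl hbl
  have hsep : "\n\n".toList = "\n".toList ++ "\n".toList := rfl
  rw [hsep, joinBlocks "\n".toList (blocks.map (List.map String.toList)) hne']
  cases hc : blocks.map (List.map String.toList) with
  | nil => simp
  | cons B rest =>
    rw [if_neg (by simp)]
    exact strip_append_newline _

-- a joined block list is empty exactly when the list is empty (blocks are nonempty strings)
theorem str_join_ne_empty (sep y : String) (L : List String) (hy : y ≠ "") :
    PySem.Str.join sep (y :: L) ≠ "" := by
  intro h
  have ht := congrArg String.toList h
  cases L with
  | nil => simp [PySem.Str.toList_join, PySem.Chars.join_singleton] at ht; exact hy ht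
  | cons z r =>
    simp [PySem.Str.toList_join, PySem.Chars.join_cons_cons] at ht
    exact hy ht.1

-- B's concatenated block string = the "\n"-join of the doc's block lines
theorem block_concat_eq (hdr q a : String) :
    ((if q ≠ "" then hdr ++ "\nQ: " ++ q else hdr) ++
      (if a ≠ "" then "\nA: " ++ a else ""))
    = PySem.Str.join "\n" ([hdr]
        ++ (if q ≠ "" then ["Q: " ++ q] else [])
        ++ (if a ≠ "" then ["A: " ++ a] else [])) := by
  have hQ : ("\nQ: " : String).toList = "\n".toList ++ "Q: ".toList := rfl
  have hA : ("\nA: " : String).toList = "\n".toList ++ "A: ".toList := rfl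
  by_cases hq : q = "" <;> by_cases ha : a = "" <;>
    · rw [← String.toList_inj]
      simp [hq, ha, PySem.Str.toList_join, PySem.Chars.join_singleton,
        PySem.Chars.join_cons_cons, hQ, hA, List.append_assoc]

-- every kept block string is nonempty (it starts with the FAQ header)
theorem blocks_ne_empty (l : List (Int × List (String × String))) :
    ∀ y ∈ l.filterMap (fun p => (faqBlockLines? p).map (PySem.Str.join "\n")), y ≠ "" := by
  intro y hy
  rcases List.mem_filterMap.mp hy with ⟨p, _, hp⟩
  cases hfb : faqBlockLines? p with
  | none => rw [hfb] at hp; simp at hp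
  | some bl =>
    rw [hfb] at hp
    simp only [Option.map_some, Option.some.injEq] at hp
    unfold faqBlockLines? at hfb
    by_cases h2 : (PySem.Dict.mk p.2).getD "question" "" = ""
        ∧ (PySem.Dict.mk p.2).getD "answer" "" = ""
    · simp [h2] at hfb
    · simp only [h2, if_false, Option.some.injEq] at hfb
      subst hfb
      rw [← hp]
      exact str_join_ne_empty _ _ _ (by
        intro h
        have := congrArg String.toList h
        simp at this)

-- prepending one nonempty block to a "\n\n"-join, separator chosen by tail emptiness
theorem join2_cons (x : String) (L : List String) (hL : ∀ y ∈ L, y ≠ "") :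
    (if PySem.Str.join "\n\n" L = "" then x
      else x ++ "\n\n" ++ PySem.Str.join "\n\n" L)
    = PySem.Str.join "\n\n" (x :: L) := by
  cases L with
  | nil =>
    rw [if_pos]
    · rw [← String.toList_inj]
      simp [PySem.Str.toList_join, PySem.Chars.join_singleton]
    · rw [← String.toList_inj]
      simp [PySem.Str.toList_join, PySem.Chars.join_nil]
  | cons y r =>
    rw [if_neg (str_join_ne_empty _ _ _ (hL y (by simp)))]
    rw [← String.toList_inj]
    simp only [String.toList_append, PySem.Str.toList_join, List.map_cons]
    rw [join_cons_ne "\n\n".toList x.toList (y.toList :: r.map String.toList) (by simp)]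

-- the recursion computes the "\n\n"-join of the per-doc block strings
theorem faqGo_eq (l : List (List (String × String))) (i : Int) :
    faqGo i l = PySem.Str.join "\n\n"
      ((PySem.List.enumerate l i).filterMap
        (fun p => (faqBlockLines? p).map (PySem.Str.join "\n"))) := by
  induction l generalizing i with
  | nil =>
    rw [← String.toList_inj]
    simp [faqGo, PySem.List.enumerate_nil, PySem.Str.toList_join, PySem.Chars.join_nil]
  | cons d rest ih =>
    rw [PySem.List.enumerate_cons]
    simp only [faqGo, List.filterMap_cons, ih (i + 1)]
    set q := (PySem.Dict.mk d).getD "question" "" with hqdef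
    set a := (PySem.Dict.mk d).getD "answer" "" with hadef
    by_cases hsk : q = "" ∧ a = ""
    · simp [faqBlockLines?, hsk, ← hqdef, ← hadef]
    · have hbl : faqBlockLines? (i, d) = some (["FAQ " ++ PySem.Int.toStr i ++ ":"]
          ++ (if q ≠ "" then ["Q: " ++ q] else [])
          ++ (if a ≠ "" then ["A: " ++ a] else [])) := by
        simp [faqBlockLines?, ← hqdef, ← hadef, hsk]
      rw [if_neg hsk, hbl]
      simp only [Option.map_some]
      rw [← join2_cons _ _ (blocks_ne_empty _),
        ← block_concat_eq ("FAQ " ++ PySem.Int.toStr i ++ ":") q a]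
      split_ifs <;> simp_all [String.append_assoc] <;>
        (rw [← String.toList_inj]; simp [String.toList_append])

-- ===== VERDICT (by name: the statement is the Claim_ definition above) =====
theorem format_faq_context_py_spec : Claim_equal_format_faq_context_py := by
  intro faq_docs _
  unfold Spec_format_faq_context_py format_faq_context_py format_faq_context_py_alt
  rw [foldA_eq, List.nil_append, flatMap_filterMap_bl, faqGo_eq, ← List.map_filterMap]
  apply main_str
  intro bl hbl
  rcases List.mem_filterMap.mp hbl with ⟨p, _, hp⟩
  unfold faqBlockLines? at hp
  by_cases h : (PySem.Dict.mk p.2).getD "question" "" = "" ∧ (PySem.Dict.mk p.2).getD "answer" "" = ""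
  · simp [h] at hp
  · simp only [h, if_false, Option.some.injEq] at hp
    subst hp
    simp
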